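-- pv_equiv track=rewrite | github.com/Abdulsametkuk/Kuk-Encryption-Method | Kuk Encryption Method/Kuk Encryption Method.py | kukari_sifrele
-- ===== SOURCE A (Python) =====
-- def gcd(a, b):
--     while b != 0:
--         a, b = b, a % b
--     return a
--
-- def kukari_sifrele(duz_metin, m, a, b, n=26):  # m: anahtar uzunluğu, a: çarpma anahtarı, b: kaydırma anahtarı
--     k = [i+1 for i in range(m)]   # anahtar uzunluğu kadar bir başlangıç anahtar oluşturduk. m = 5 ise k = [1, 2, 3, 4, 5]
--     sifreli_metin = ''
--     for i in range(0, len(duz_metin), m): # metnin hangi yerden bloklara ayrılacağını belirledik ve bloklara ayırdık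
--         blok = duz_metin[i:i+m] # Burada metne ait blokları sırası ile aldık
--         for j in range(len(blok)): # Blok uzunluğu kadar döngü oluşturduk
--             kaydir = (ord(blok[j]) - ord('A') + k[j]) % 26 # ord(blok[j]) - ord('A') fonksiyonu her bir harfin alfabedeki sırasını bulduk ve k[j] ile kaydırma işlemi yaptık
--             sifreli_metin += chr(kaydir + ord('A'))   # kaydırma sonucunda elde ettiğimiz harfleri sifreli_metin'e ekledik
--         k = [(x + 1) % 26 for x in k] # Anahtarları birer birer kaydırarak gücelledik
--     if gcd(a, n) != 1:
--         raise ValueError("Çarpma anahtarı ve alfabe boyutu aralarında asal olmalı")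
--     sonuc = ''
--     for char in sifreli_metin:
--         P = ord(char) - ord('A')
--         C = (a * P + b) % n
--         sonuc += chr(C + ord('A'))
--     return sonuc
-- ===== SOURCE B (Python) =====
-- def gcd(a, b):
--     while b != 0:
--         a, b = b, a % b
--     return a
--
-- def kukari_sifrele(duz_metin, m, a, b, n=26):
--     if gcd(a, n) != 1:
--         raise ValueError("Çarpma anahtarı ve alfabe boyutu aralarında asal olmalı")
--     sonuc = []
--     for idx, ch in enumerate(duz_metin):
--         shift = (idx % m + 1 + idx // m) % 26
--         P = (ord(ch) - ord('A') + shift) % 26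
--         sonuc.append(chr((a * P + b) % n + ord('A')))
--     return ''.join(sonuc)
-- ===== Notes on version B (the rewrite author's own statement) =====
-- stated objective: simpler
-- what changed: B drops A's rotating key list, block slicing and intermediate ciphertext string: one pass over the text computes each character's shift in closed form from its index (shift = (idx % m + 1 + idx // m) % 26) and applies both the polyalphabetic and the affine stage at once, with the gcd validity check moved up front.
-- outside the precondition, e.g. on kukari_sifrele('AB', -1, 1, 0, 26): A returns '', B returns 'BB'; on kukari_sifrele('', 1, 1, 0, 0): A returns '', B returns ''; on kukari_sifrele('A', 1, 1, 2, 60000): A returns 'D', B returns 'D'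
import Mathlib
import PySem

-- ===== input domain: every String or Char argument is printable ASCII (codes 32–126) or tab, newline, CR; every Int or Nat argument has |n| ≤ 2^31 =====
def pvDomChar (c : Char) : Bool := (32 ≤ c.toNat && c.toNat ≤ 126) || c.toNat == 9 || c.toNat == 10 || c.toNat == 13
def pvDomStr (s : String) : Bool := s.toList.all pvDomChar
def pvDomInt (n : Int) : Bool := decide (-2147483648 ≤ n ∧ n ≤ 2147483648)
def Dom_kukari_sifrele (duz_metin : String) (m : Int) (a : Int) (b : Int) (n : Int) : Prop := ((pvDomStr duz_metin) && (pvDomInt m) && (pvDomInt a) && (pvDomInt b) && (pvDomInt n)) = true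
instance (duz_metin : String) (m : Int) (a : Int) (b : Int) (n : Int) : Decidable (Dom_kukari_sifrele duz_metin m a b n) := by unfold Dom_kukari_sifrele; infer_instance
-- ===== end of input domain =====

-- B replaces A's rotating key list and intermediate ciphertext string by one pass that computes each
-- character's shift in closed form from its index and applies both cipher stages at once (objective: simpler).

-- ===== PORT A =====
-- termination fact for the repo's Euclid helper (Python floor-mod shrinks |b|)
theorem pyMod_natAbs_lt (a b : Int) (hb : ¬ b = 0) :
    (PySem.Int.mod a b).natAbs < b.natAbs := by
  rcases lt_or_gt_of_ne hb with h | h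
  · have := PySem.Int.mod_neg_bounds a h
    omega
  · have h1 := PySem.Int.mod_nonneg a h
    have h2 := PySem.Int.mod_lt a h
    omega

-- the repo's own gcd helper (while b != 0: a, b = b, a % b)
def pyGcd (a b : Int) : Int :=
  if h : b = 0 then a else pyGcd b (PySem.Int.mod a b)
termination_by b.natAbs
decreasing_by exact pyMod_natAbs_lt a b h

-- inner loop: for j in range(len(blok)): sifreli_metin += chr((ord(blok[j]) - ord('A') + k[j]) % 26 + ord('A'))
def kukBlokFold (k : List Int) (blok : List Char) (acc : List Char) : List Char :=
  (PySem.List.pyRange 0 (PySem.List.len blok) 1).foldl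
    (fun acc j =>
      acc ++ [Char.ofNat ((PySem.Int.mod (((PySem.List.pyGetD blok j 'A').toNat : Int) - 65
        + PySem.List.pyGetD k j 0) 26 + 65).toNat)]) acc

-- outer loop: for i in range(0, len(duz_metin), m): take the block, encrypt it, rotate the key list
def kukStage1 (metin : List Char) (m : Int) (st : List Int × List Char) : List Int × List Char :=
  (PySem.List.pyRange 0 (PySem.List.len metin) m).foldl
    (fun st i =>
      let blok := PySem.List.slice metin (some i) (some (i + m))
      (st.1.map (fun x => PySem.Int.mod (x + 1) 26), kukBlokFold st.1 blok st.2))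
    st

-- body of A's final loop: P = ord(char) - ord('A'); C = (a*P + b) % n; chr(C + ord('A'))
def kukAffine (a b n : Int) (ch : Char) : Char :=
  let P : Int := (ch.toNat : Int) - 65
  let C := PySem.Int.mod (a * P + b) n
  Char.ofNat ((C + 65).toNat)

def kukari_sifrele (duz_metin : String) (m : Int) (a : Int) (b : Int) (n : Int) : String :=
  let metin := duz_metin.toList
  let k0 : List Int := (PySem.List.pyRange 0 m 1).map (fun i => i + 1)
  let st := kukStage1 metin m (k0, [])
  if pyGcd a n ≠ 1 then ""   -- Python raises ValueError here; Pre_ excludes these inputs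
  else
    String.ofList (st.2.foldl (fun acc ch => acc ++ [kukAffine a b n ch]) [])

-- ===== PORT B =====
def kukari_sifrele_alt (duz_metin : String) (m : Int) (a : Int) (b : Int) (n : Int) : String :=
  if pyGcd a n ≠ 1 then ""   -- same ValueError, checked up front; Pre_ excludes these inputs
  else
    String.ofList ((PySem.List.enumerate duz_metin.toList 0).map (fun p =>
      let shift := PySem.Int.mod (PySem.Int.mod p.1 m + 1 + PySem.Int.floordiv p.1 m) 26
      let P := PySem.Int.mod (((p.2.toNat : Int) - 65) + shift) 26
      Char.ofNat ((PySem.Int.mod (a * P + b) n + 65).toNat)))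

-- ===== PRECONDITION & SPEC =====
-- Pre_ excludes inputs on which Python A raises, plus two corners where A still returns a value:
--  * m ≤ 0: m = 0 raises ValueError (range step 0); for m < 0 A's block loop is empty and it
--    accidentally returns '' — a degenerate corner (negative key length) where B's per-index pass
--    returns a full encryption instead; neither behaviour is specified.
--  * n ≤ 0 or gcd(a,n) ≠ 1: A raises ValueError (the repo gcd is ≠ 1 for every n < 0, and never 1
--    for n = 0 unless a = 1, where A then raises ZeroDivisionError on any non-empty text; the sole
--    returning case is the empty text, on which both programs return '').
--  * n > 55231: A can return characters with code points ≥ 0xD800 (lone surrogates), which are not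
--    representable as Lean Char/String, so those outputs cannot be ported.
def Pre_kukari_sifrele (duz_metin : String) (m : Int) (a : Int) (b : Int) (n : Int) : Prop :=
  1 ≤ m ∧ 1 ≤ n ∧ n ≤ 55231 ∧ Int.gcd a n = 1
instance (duz_metin : String) (m : Int) (a : Int) (b : Int) (n : Int) : Decidable (Pre_kukari_sifrele duz_metin m a b n) := by unfold Pre_kukari_sifrele; infer_instance
def pvWitness_kukari_sifrele : String × Int × Int × Int × Int := ("HELLO", 2, 3, 1, 26)

def Spec_kukari_sifrele (duz_metin : String) (m : Int) (a : Int) (b : Int) (n : Int) (out : String) : Prop := out = kukari_sifrele_alt duz_metin m a b n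
instance (duz_metin : String) (m : Int) (a : Int) (b : Int) (n : Int) (out : String) : Decidable (Spec_kukari_sifrele duz_metin m a b n out) := by unfold Spec_kukari_sifrele; infer_instance

-- ===== CLAIM (what is proved, stated in full; the proofs are below) =====
def Claim_equal_kukari_sifrele : Prop := ∀ (duz_metin : String) (m : Int) (a : Int) (b : Int) (n : Int), Dom_kukari_sifrele duz_metin m a b n → Pre_kukari_sifrele duz_metin m a b n → Spec_kukari_sifrele duz_metin m a b n (kukari_sifrele duz_metin m a b n)

-- ===== LEMMAS AND PROOFS =====

-- B's per-character stage-1 value, with the mod-26 of the shift folded in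
def kukS1Char (m idx : Int) (c : Char) : Char :=
  Char.ofNat ((PySem.Int.mod (((c.toNat : Int) - 65)
    + (PySem.Int.mod idx m + 1 + PySem.Int.floordiv idx m)) 26 + 65).toNat)

theorem mod26_emod (x : Int) : PySem.Int.mod x 26 = x % 26 :=
  PySem.Int.mod_eq_emod_of_pos (by norm_num)

theorem mod26_add_congr (x u v : Int) (h : PySem.Int.mod u 26 = PySem.Int.mod v 26) :
    PySem.Int.mod (x + u) 26 = PySem.Int.mod (x + v) 26 := by
  simp only [mod26_emod] at *
  rw [Int.add_emod x u, h, ← Int.add_emod]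

theorem charOfNat_toNat (w : Nat) (h : w < 55296) : (Char.ofNat w).toNat = w := by
  have : w.isValidChar := Or.inl h
  simp [Char.ofNat, this]

theorem pyGcd_pos_eq (a b : Int) (hb : 0 < b) : pyGcd a b = Int.gcd a b := by
  have H : ∀ (N : Nat) (a b : Int), b.natAbs ≤ N → 0 < b → pyGcd a b = Int.gcd a b := by
    intro N
    induction N with
    | zero => intro a b h hb; omega
    | succ N ih =>
      intro a b h hb
      rw [pyGcd, dif_neg (by omega)]
      have hmod := PySem.Int.mod_nonneg a hb
      have hlt := PySem.Int.mod_lt a hb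
      by_cases h0 : PySem.Int.mod a b = 0
      · rw [h0, pyGcd, dif_pos rfl]
        have hdvd : b ∣ a := (PySem.Int.mod_eq_zero_iff_dvd a b).mp h0
        have := Int.gcd_eq_natAbs_right hdvd
        omega
      · rw [ih b (PySem.Int.mod a b) (by have := pyMod_natAbs_lt a b (by omega); omega) (by omega)]
        rw [PySem.Int.mod_eq_emod_of_pos hb, Int.gcd_comm b (a % b), Int.gcd_emod, Int.gcd_comm,
          Int.gcd_comm b a]
  exact H b.natAbs a b le_rfl hb

theorem pyRange_nonpos (b m : Int) (hm : 0 < m) (hb : b ≤ 0) :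
    PySem.List.pyRange 0 b m = [] := by
  rw [PySem.List.pyRange_of_pos _ _ hm]
  simp [show ¬ (0 < b) by omega]

theorem pyRangeChunk (L m : Int) (hm : 0 < m) (hL : 0 < L) :
    PySem.List.pyRange 0 L m = 0 :: (PySem.List.pyRange 0 (L - m) m).map (· + m) := by
  rw [PySem.List.pyRange_of_pos _ _ hm, PySem.List.pyRange_of_pos _ _ hm]
  by_cases h : 0 < L - m
  · simp only [if_pos hL, if_pos h]
    have key : ((L - 0 + m - 1) / m).toNat = ((L - m - 0 + m - 1) / m).toNat + 1 := by
      have h1 : L - 0 + m - 1 = (L - m - 0 + m - 1) + 1 * m := by ring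
      have h2 : 0 ≤ (L - m - 0 + m - 1) / m := Int.ediv_nonneg (by omega) (by omega)
      rw [h1, Int.add_mul_ediv_right _ _ (by omega : m ≠ 0)]
      omega
    rw [key, List.range_succ_eq_map, List.map_cons, List.map_map, List.map_map]
    simp only [Nat.cast_zero, mul_zero, add_zero, List.cons.injEq, true_and]
    apply List.map_congr_left
    intro j _
    simp only [Function.comp_apply]
    push_cast
    ring
  · have hN : ((L - 0 + m - 1) / m).toNat = 1 := by
      have h1 : (L - 0 + m - 1) / m = 1 := by
        rw [← PySem.Int.floordiv_eq_ediv_of_pos hm]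
        exact (PySem.Int.floordiv_eq_iff_of_pos hm).mpr ⟨by omega, by omega⟩
      omega
    simp only [if_pos hL, if_neg h, hN, List.range_one, List.map_cons, List.map_nil,
      List.range_zero, Nat.cast_zero, mul_zero, add_zero]

theorem map_enumerate_eq {α β : Type} (xs : List α) (s : Int) (f : Int × α → β) (d : α) :
    (PySem.List.enumerate xs s).map f
      = (List.range xs.length).map (fun j : Nat => f (s + (j : Int), xs.getD j d)) := by
  induction xs generalizing s with
  | nil => simp [PySem.List.enumerate_nil]
  | cons x t ih =>
    rw [PySem.List.enumerate_cons, List.map_cons, ih (s + 1),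
      List.length_cons, List.range_succ_eq_map, List.map_cons, List.map_map]
    simp only [Nat.cast_zero, add_zero, List.getD_cons_zero, List.cons.injEq, true_and]
    apply List.map_congr_left
    intro j _
    simp only [Function.comp_apply, List.getD_cons_succ]
    congr 2
    push_cast
    ring

theorem blok_eq (m t : Int) (hm : 0 < m) (k : List Int) (hk : k.length = m.toNat)
    (hinv : ∀ j : ℕ, j < m.toNat → PySem.Int.mod (k.getD j 0) 26 = PySem.Int.mod ((j : Int) + 1 + t) 26)
    (blok : List Char) (hb : blok.length ≤ m.toNat) (acc : List Char) :
    kukBlokFold k blok acc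
      = acc ++ (PySem.List.enumerate blok (t * m)).map (fun p => kukS1Char m p.1 p.2) := by
  unfold kukBlokFold
  rw [PySem.List.len_eq, PySem.List.pyRange_one]
  have hcast : (((blok.length : Int)) - 0).toNat = blok.length := by omega
  rw [hcast, List.foldl_map, PySem.List.foldl_append_singleton_eq_map,
    map_enumerate_eq blok (t * m) _ 'A']
  congr 1
  apply List.map_congr_left
  intro j hj
  rw [List.mem_range] at hj
  have hjm : (j : Int) < m := by omega
  simp only [zero_add, PySem.List.pyGetD_natCast]
  unfold kukS1Char
  have hidx_mod : PySem.Int.mod (t * m + (j : Int)) m = (j : Int) := by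
    rw [PySem.Int.mod_eq_emod_of_pos hm, show t * m + (j : Int) = (j : Int) + m * t by ring,
      Int.add_mul_emod_self_left, Int.emod_eq_of_lt (by omega) hjm]
  have hidx_div : PySem.Int.floordiv (t * m + (j : Int)) m = t := by
    rw [PySem.Int.floordiv_eq_ediv_of_pos hm, show t * m + (j : Int) = (j : Int) + t * m by ring,
      Int.add_mul_ediv_right _ _ (by omega : m ≠ 0), Int.ediv_eq_zero_of_lt (by omega) hjm,
      zero_add]
  rw [hidx_mod, hidx_div]
  congr 3
  exact mod26_add_congr _ _ _ (hinv j (by omega))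

theorem kinv_step (m t : Int) (k : List Int) (hk : k.length = m.toNat)
    (hinv : ∀ j : ℕ, j < m.toNat → PySem.Int.mod (k.getD j 0) 26 = PySem.Int.mod ((j : Int) + 1 + t) 26) :
    ∀ j : ℕ, j < m.toNat →
      PySem.Int.mod ((k.map (fun x => PySem.Int.mod (x + 1) 26)).getD j 0) 26
        = PySem.Int.mod ((j : Int) + 1 + (t + 1)) 26 := by
  intro j hj
  have hj' : j < k.length := by omega
  have h1 := hinv j hj
  rw [List.getD_eq_getElem _ _ hj'] at h1
  rw [List.getD_eq_getElem _ _ (by simpa using hj'), List.getElem_map]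
  simp only [mod26_emod] at h1 ⊢
  rw [Int.emod_emod_of_dvd _ (dvd_refl 26), Int.add_emod (k[j]) 1, h1, ← Int.add_emod,
    show (j : Int) + 1 + t + 1 = (j : Int) + 1 + (t + 1) by ring]

theorem kukStage1_chunk (metin : List Char) (m : Int) (hm : 0 < m) (st : List Int × List Char)
    (hne : metin ≠ []) :
    kukStage1 metin m st
      = kukStage1 (metin.drop m.toNat) m
          (st.1.map (fun x => PySem.Int.mod (x + 1) 26), kukBlokFold st.1 (metin.take m.toNat) st.2) := by
  have hL : (0 : Int) < metin.length := by
    have := List.length_pos_iff.mpr hne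
    omega
  unfold kukStage1
  rw [PySem.List.len_eq, PySem.List.len_eq, pyRangeChunk _ m hm hL, List.foldl_cons]
  simp only [zero_add]
  have hblok : PySem.List.slice metin (some 0) (some m) = metin.take m.toNat := by
    rw [PySem.List.slice_zero_start]
    exact PySem.List.slice_to _ (le_of_lt hm)
  rw [hblok, List.foldl_map]
  by_cases hcase : m < (metin.length : Int)
  · have hlen : ((metin.drop m.toNat).length : Int) = (metin.length : Int) - m := by
      rw [List.length_drop]
      omega
    rw [hlen]
    apply PySem.List.foldl_congr_mem
    intro acc i hi
    rw [PySem.List.mem_pyRange_iff_of_pos hm] at hi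
    have h0i : 0 ≤ i := hi.1
    have hslice : PySem.List.slice metin (some (i + m)) (some (i + m + m))
        = PySem.List.slice (metin.drop m.toNat) (some i) (some (i + m)) := by
      rw [PySem.List.slice_toNat _ (by omega) (by omega),
        PySem.List.slice_toNat _ (by omega) (by omega), List.drop_drop]
      have e1 : (i + m + m).toNat - (i + m).toNat = (i + m).toNat - i.toNat := by omega
      have e2 : (i + m).toNat = m.toNat + i.toNat := by omega
      rw [e1, e2]
    rw [hslice]
  · have h1 : (metin.length : Int) - m ≤ 0 := by omega
    have h2 : ((metin.drop m.toNat).length : Int) ≤ 0 := by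
      rw [List.length_drop]
      omega
    rw [pyRange_nonpos _ _ hm h1, pyRange_nonpos _ _ hm h2]
    simp

theorem stage1_eq (m : Int) (hm : 0 < m) :
    ∀ (L : Nat) (metin : List Char), metin.length = L → ∀ (t : Int), 0 ≤ t →
      ∀ (k : List Int) (acc : List Char), k.length = m.toNat →
      (∀ j : ℕ, j < m.toNat → PySem.Int.mod (k.getD j 0) 26 = PySem.Int.mod ((j : Int) + 1 + t) 26) →
      (kukStage1 metin m (k, acc)).2
        = acc ++ (PySem.List.enumerate metin (t * m)).map (fun p => kukS1Char m p.1 p.2) := by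
  intro L
  induction L using Nat.strong_induction_on with
  | _ L IH =>
    intro metin hlen t ht k acc hk hinv
    rcases eq_or_ne metin [] with rfl | hne
    · unfold kukStage1
      rw [PySem.List.len_eq]
      simp [pyRange_nonpos 0 m hm le_rfl, PySem.List.enumerate_nil]
    · have hLpos : 0 < L := by
        have := List.length_pos_iff.mpr hne
        omega
    
      have hm1 : 1 ≤ m.toNat := by omega
      rw [kukStage1_chunk metin m hm _ hne]
      have hIH := IH ((metin.drop m.toNat).length) (by rw [List.length_drop]; omega)
        (metin.drop m.toNat) rfl (t + 1) (by omega)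
        (k.map (fun x => PySem.Int.mod (x + 1) 26))
        (kukBlokFold k (metin.take m.toNat) acc)
        (by rw [List.length_map]; exact hk)
        (kinv_step m t k hk hinv)
      rw [hIH, blok_eq m t hm k hk hinv (metin.take m.toNat) (by simp) acc]
      conv_rhs => rw [← List.take_append_drop m.toNat metin]
      rw [PySem.List.enumerate_append, List.map_append, List.append_assoc]
      congr 2
      by_cases hd : metin.length ≤ m.toNat
      · rw [List.drop_eq_nil_of_le hd]
        simp [PySem.List.enumerate_nil]
      · have htake : ((metin.take m.toNat).length : Int) = m := by
          rw [List.length_take]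
          omega
        rw [htake, show t * m + m = (t + 1) * m by ring]

-- Python's affine second stage applied to one character (the body of A's last loop)
theorem final_char (m a b n idx : Int) (c : Char) :
    kukAffine a b n (kukS1Char m idx c)
      = Char.ofNat ((PySem.Int.mod (a * (PySem.Int.mod (((c.toNat : Int) - 65)
          + PySem.Int.mod (PySem.Int.mod idx m + 1 + PySem.Int.floordiv idx m) 26) 26) + b) n
          + 65).toNat) := by
  unfold kukAffine kukS1Char
  set s := PySem.Int.mod idx m + 1 + PySem.Int.floordiv idx m with hs
  have h0 : 0 ≤ PySem.Int.mod (((c.toNat : Int) - 65) + s) 26 :=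
    PySem.Int.mod_nonneg _ (by norm_num)
  have h1 : PySem.Int.mod (((c.toNat : Int) - 65) + s) 26 < 26 :=
    PySem.Int.mod_lt _ (by norm_num)
  rw [charOfNat_toNat _ (by omega)]
  have hP : ((PySem.Int.mod (((c.toNat : Int) - 65) + s) 26 + 65).toNat : Int) - 65
      = PySem.Int.mod (((c.toNat : Int) - 65) + s) 26 := by omega
  rw [hP]
  have hM : PySem.Int.mod (((c.toNat : Int) - 65) + s) 26
      = PySem.Int.mod (((c.toNat : Int) - 65) + PySem.Int.mod s 26) 26 := by
    apply mod26_add_congr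
    simp [Int.emod_emod_of_dvd]
  rw [hM]

-- ===== VERDICT (by name: the statement is the Claim_ definition above) =====
theorem kukari_sifrele_spec : Claim_equal_kukari_sifrele := by
  unfold Claim_equal_kukari_sifrele
  intro d m a b n _ hpre
  obtain ⟨hm, hn, _, hg⟩ := hpre
  unfold Spec_kukari_sifrele kukari_sifrele kukari_sifrele_alt
  have hgcd : pyGcd a n = 1 := by
    rw [pyGcd_pos_eq a n (by omega), hg]
    norm_num
  rw [if_neg (by simp [hgcd]), if_neg (by simp [hgcd])]
  have hk0len : ((PySem.List.pyRange 0 m 1).map (fun i => i + 1)).length = m.toNat := by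
    simp [PySem.List.length_pyRange_one]
  have hk0inv : ∀ j : ℕ, j < m.toNat →
      PySem.Int.mod (((PySem.List.pyRange 0 m 1).map (fun i => i + 1)).getD j 0) 26
        = PySem.Int.mod ((j : Int) + 1 + 0) 26 := by
    intro j hj
    rw [List.getD_eq_getElem _ _ (by simp [PySem.List.length_pyRange_one]; omega),
      List.getElem_map, PySem.List.getElem_pyRange_one]
    norm_num
  have h1 := stage1_eq m (by omega) d.toList.length d.toList rfl 0 le_rfl _ [] hk0len hk0inv
  simp only [List.nil_append, zero_mul] at h1
  rw [h1, PySem.List.foldl_append_singleton_eq_map, List.nil_append, List.map_map]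
  congr 1
  apply List.map_congr_left
  intro p _
  exact final_char m a b n p.1 p.2
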